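-- pv_equiv track=rewrite | github.com/saisravan84/cipherproject | pro4/project/algos/bicii/act_pages/algos/biciien.py | encr
-- ===== SOURCE A (Python) =====
-- def encr(plain_text,key_1):
--     alpha="abcdefghijklmnopqrstuvwxyz"
--     input_string=plain_text
--     input_key=int(key_1)
--     input_string_list=[i for i in input_string]
--     output_string_list=[]
--     for i in input_string_list:
--         lower_i=i.lower()
--         if i in alpha:
--             indexpo=alpha.index(i)
--             output_string_list.append(alpha[(indexpo+input_key)%26])
--         elif lower_i in alpha:
--             indexpo=alpha.index(lower_i)
--             output_string_list.append(alpha[(indexpo+input_key)%26].upper())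
--         else:
--             output_string_list.append(i)
--     input_string =''.join(output_string_list);
--     encrypted_array = [];
--     for letter in input_string:
--             bin_value = bin(ord(letter))[2:];
--             if len(bin_value) < 8:
--                     length = 8 - len(bin_value);
--                     binary = '';
--                     while length != 0:
--                             binary = binary + '0';
--                             length -= 1;
--                     bin_value = binary + bin_value;
--             encrypt_bin = bin_value[0:2] + bin_value[2:6][::-1] + bin_value[6:8];
--             encrypted_array.append(chr(int(encrypt_bin,2)));
--     encrypt = ''.join(encrypted_array);
--     return encrypt
-- ===== SOURCE B (Python) =====
-- LOWER = "abcdefghijklmnopqrstuvwxyz"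
-- BITPERM = [0, 1, 5, 4, 3, 2, 6, 7]
-- # scramble table: for each 7-bit code, gather its bits in BITPERM order
-- SCRAMBLE = {n: sum(((n >> (7 - p)) & 1) << (7 - i) for i, p in enumerate(BITPERM))
--             for n in range(128)}
--
-- def encr(plain_text, key_1):
--     k = int(key_1) % 26
--     rot = LOWER[k:] + LOWER[:k]
--     caesar_tbl = str.maketrans(LOWER + LOWER.upper(), rot + rot.upper())
--     return plain_text.translate(caesar_tbl).translate(SCRAMBLE)
-- ===== Notes on version B (the rewrite author's own statement) =====
-- stated objective: faster
-- what changed: B precomputes two translation tables once (a rotated-alphabet str.maketrans for the Caesar step and a fixed 128-entry bit-permutation table) and applies them with str.translate, replacing A's per-character alphabet index() scans and binary-string padding/slicing.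
import Mathlib
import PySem

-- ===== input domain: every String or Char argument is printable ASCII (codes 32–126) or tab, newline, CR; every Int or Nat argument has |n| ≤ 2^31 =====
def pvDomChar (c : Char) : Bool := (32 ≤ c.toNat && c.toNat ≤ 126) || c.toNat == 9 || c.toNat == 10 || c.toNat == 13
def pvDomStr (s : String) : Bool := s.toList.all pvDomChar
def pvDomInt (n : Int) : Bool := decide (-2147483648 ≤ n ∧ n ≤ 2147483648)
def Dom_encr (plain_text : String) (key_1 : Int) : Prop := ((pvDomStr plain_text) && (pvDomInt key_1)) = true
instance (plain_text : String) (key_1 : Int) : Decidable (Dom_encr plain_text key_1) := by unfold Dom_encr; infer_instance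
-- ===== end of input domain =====

-- B replaces A's per-character alphabet index() scans and binary-string padding/slicing with
-- two translation tables built once (a rotated-alphabet str.maketrans for the Caesar step and
-- a fixed 128-entry bit-permutation table) applied via str.translate (objective: idiomatic).

-- ===== PORT A =====
def pvAlpha : List Char := "abcdefghijklmnopqrstuvwxyz".toList

-- first loop body of A; 'i in alpha' with a 1-char string is char membership;
-- alpha.index is guarded by membership so .getD 0 is never the default;
-- alpha[(indexpo+key)%26] index is in [0,26) so .getD ' ' is never the default
def pvShiftA (key : Int) (i : Char) : Char :=
  let lower_i := PySem.Chars.lowerChar i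
  if pvAlpha.contains i then
    let indexpo : Int := ((PySem.List.index? pvAlpha i).getD 0 : Nat)
    (PySem.List.pyGet? pvAlpha (PySem.Int.mod (indexpo + key) 26)).getD ' '
  else if pvAlpha.contains lower_i then
    let indexpo : Int := ((PySem.List.index? pvAlpha lower_i).getD 0 : Nat)
    PySem.Chars.upperChar ((PySem.List.pyGet? pvAlpha (PySem.Int.mod (indexpo + key) 26)).getD ' ')
  else i

-- 'while length != 0: binary = binary + "0"; length -= 1'
def pvPadLoop : Nat → List Char → List Char
  | 0, binary => binary
  | Nat.succ n, binary => pvPadLoop n (binary ++ ['0'])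

-- second loop body of A; bin(ord(letter))[2:] is PySem.Int.toBinChars (ord ≥ 0);
-- int(encrypt_bin, 2) is guarded (nonempty 0/1 digits) so .getD 0 is never the default
def pvBitA (letter : Char) : Char :=
  let bin_value := PySem.Int.toBinChars (letter.toNat : Int)
  let bin_value :=
    if bin_value.length < 8 then pvPadLoop (8 - bin_value.length) [] ++ bin_value else bin_value
  let encrypt_bin :=
    PySem.List.slice bin_value (some 0) (some 2)
      ++ ((PySem.List.slice? (PySem.List.slice bin_value (some 2) (some 6)) none none (-1)).getD [])
      ++ PySem.List.slice bin_value (some 6) (some 8)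
  Char.ofNat ((PySem.Int.ofCharsBase? encrypt_bin 2).getD 0).toNat

def encr (plain_text : String) (key_1 : Int) : String :=
  let input_key : Int := key_1   -- int(key_1) on an int is the identity
  let output_string_list := plain_text.toList.map (pvShiftA input_key)
  String.mk (output_string_list.map pvBitA)

-- ===== PORT B =====
def pvLowerB : List Char := "abcdefghijklmnopqrstuvwxyz".toList

def pvBitPerm : List Nat := [0, 1, 5, 4, 3, 2, 6, 7]

-- sum(((n >> (7 - p)) & 1) << (7 - i) for i, p in enumerate(BITPERM))
def pvBitValB (n : Nat) : Nat :=
  (PySem.List.enumerate pvBitPerm).foldl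
    (fun acc ip => acc + ((n >>> (7 - ip.2)) &&& 1) <<< (7 - ip.1.toNat)) 0

-- SCRAMBLE = {n: … for n in range(128)}; a dict keyed by code point, as an assoc list
def pvScrTbl : List (Int × Int) :=
  (List.range 128).map (fun (n : Nat) => ((n : Int), ((pvBitValB n : Nat) : Int)))

-- rot = LOWER[k:] + LOWER[:k]
def pvRotB (k : Nat) : List Char :=
  PySem.List.slice pvLowerB (some (k : Int)) none ++ PySem.List.slice pvLowerB none (some (k : Int))

-- str.maketrans(LOWER + LOWER.upper(), rot + rot.upper()) = {ord(src[i]): ord(dst[i])}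
def pvCaesarTbl (k : Nat) : List (Int × Int) :=
  ((pvLowerB ++ pvLowerB.map PySem.Chars.upperChar).map (fun c => (c.toNat : Int))).zip
    ((pvRotB k ++ (pvRotB k).map PySem.Chars.upperChar).map (fun c => (c.toNat : Int)))

-- str.translate: look the code point up in the table, keep the char if absent
def pvTrans (tbl : List (Int × Int)) (c : Char) : Char :=
  Char.ofNat ((tbl.lookup (c.toNat : Int)).getD (c.toNat : Int)).toNat

def encr_alt (plain_text : String) (key_1 : Int) : String :=
  let k := (PySem.Int.mod key_1 26).toNat
  let tbl := pvCaesarTbl k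
  String.mk ((plain_text.toList.map (pvTrans tbl)).map (pvTrans pvScrTbl))

-- ===== PRECONDITION & SPEC =====
def Spec_encr (plain_text : String) (key_1 : Int) (out : String) : Prop := out = encr_alt plain_text key_1
instance (plain_text : String) (key_1 : Int) (out : String) : Decidable (Spec_encr plain_text key_1 out) := by unfold Spec_encr; infer_instance

-- ===== CLAIM (what is proved, stated in full; the proofs are below) =====
def Claim_equal_encr : Prop := ∀ (plain_text : String) (key_1 : Int), Dom_encr plain_text key_1 → Spec_encr plain_text key_1 (encr plain_text key_1)

-- ===== LEMMAS AND PROOFS =====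
set_option maxRecDepth 100000
set_option maxHeartbeats 4000000

-- the common value of the Caesar step on a 7-bit code, as plain arithmetic
def shiftCode (k m : Nat) : Nat :=
  if 97 ≤ m ∧ m ≤ 122 then 97 + (m - 97 + k) % 26
  else if 65 ≤ m ∧ m ≤ 90 then 65 + (m - 65 + k) % 26
  else m

theorem shiftCode_lt (k m : Nat) (h : m < 127) : shiftCode k m < 127 := by
  unfold shiftCode; split_ifs <;> omega

-- B's Caesar table lookup computes shiftCode on every 7-bit char, for every residue k
theorem pv_tbl_eq : ∀ k : Nat, k < 26 → ∀ m : Nat, m < 127 →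
    pvTrans (pvCaesarTbl k) (Char.ofNat m) = Char.ofNat (shiftCode k m) := by decide

-- B's scramble table lookup agrees with A's binary-string bit step on every 7-bit char
theorem pv_scr_eq : ∀ m : Nat, m < 127 →
    pvTrans pvScrTbl (Char.ofNat m) = pvBitA (Char.ofNat m) := by decide

theorem pv_lower_facts : ∀ j : Nat, j < 26 →
    pvAlpha.contains (Char.ofNat (97 + j)) = true ∧
    PySem.List.index? pvAlpha (Char.ofNat (97 + j)) = some j ∧
    (Char.ofNat (97 + j)).toNat = 97 + j := by decide

theorem pv_upper_facts : ∀ j : Nat, j < 26 →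
    pvAlpha.contains (Char.ofNat (65 + j)) = false ∧
    PySem.Chars.lowerChar (Char.ofNat (65 + j)) = Char.ofNat (97 + j) ∧
    (Char.ofNat (65 + j)).toNat = 65 + j := by decide

theorem pv_get_alpha : ∀ m : Nat, m < 26 →
    (PySem.List.pyGet? pvAlpha ((m : Nat) : Int)).getD ' ' = Char.ofNat (97 + m) ∧
    PySem.Chars.upperChar (Char.ofNat (97 + m)) = Char.ofNat (65 + m) := by decide

theorem pv_other_facts : ∀ n : Nat, n < 127 → ¬ (97 ≤ n ∧ n ≤ 122) → ¬ (65 ≤ n ∧ n ≤ 90) →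
    pvAlpha.contains (Char.ofNat n) = false ∧
    pvAlpha.contains (PySem.Chars.lowerChar (Char.ofNat n)) = false := by decide

theorem pv_mod_fold (x key : Int) :
    PySem.Int.mod (x + PySem.Int.mod key 26) 26 = PySem.Int.mod (x + key) 26 := by
  simp only [PySem.Int.mod_eq_emod_of_pos (show (0:Int) < 26 by norm_num)]
  omega

-- A's first loop body also computes shiftCode of the char's code, at k = key % 26
theorem pvShiftA_code (key : Int) (c : Char) (h : c.toNat < 127) :
    pvShiftA key c = Char.ofNat (shiftCode (PySem.Int.mod key 26).toNat c.toNat) := by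
  have hco : Char.ofNat c.toNat = c := Char.ofNat_toNat c
  set k := (PySem.Int.mod key 26).toNat with hk
  have h0 := PySem.Int.mod_nonneg key (show (0:Int) < 26 by norm_num)
  have h1 := PySem.Int.mod_lt key (show (0:Int) < 26 by norm_num)
  have hk26 : k < 26 := by omega
  have hki : ((k : Nat) : Int) = PySem.Int.mod key 26 := by omega
  have hr : ∀ j : Nat, j < 26 →
      PySem.Int.mod ((j : Int) + key) 26 = (((j + k) % 26 : Nat) : Int) := by
    intro j hj
    rw [← pv_mod_fold, ← hki]
    exact_mod_cast PySem.Int.mod_natCast (j + k) 26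
  by_cases hl : 97 ≤ c.toNat ∧ c.toNat ≤ 122
  · obtain ⟨j, hj, hcj⟩ : ∃ j, j < 26 ∧ c = Char.ofNat (97 + j) :=
      ⟨c.toNat - 97, by omega, by rw [show 97 + (c.toNat - 97) = c.toNat by omega, hco]⟩
    subst hcj
    obtain ⟨hmem, hidx, htn⟩ := pv_lower_facts j hj
    have hsc : shiftCode k (Char.ofNat (97 + j)).toNat = 97 + (j + k) % 26 := by
      rw [htn]; unfold shiftCode
      rw [if_pos (by omega)]
      congr 1; omega
    simp only [pvShiftA, hmem, if_pos, hidx]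
    rw [show ((((some j).getD 0 : Nat) : Int) + key) = ((j : Int) + key) by simp,
      hr j hj, hsc]
    exact (pv_get_alpha ((j + k) % 26) (by omega)).1
  · by_cases hu : 65 ≤ c.toNat ∧ c.toNat ≤ 90
    · obtain ⟨j, hj, hcj⟩ : ∃ j, j < 26 ∧ c = Char.ofNat (65 + j) :=
        ⟨c.toNat - 65, by omega, by rw [show 65 + (c.toNat - 65) = c.toNat by omega, hco]⟩
      subst hcj
      obtain ⟨hmem, hlow, htn⟩ := pv_upper_facts j hj
      obtain ⟨hmeml, hidx, _⟩ := pv_lower_facts j hj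
      have hsc : shiftCode k (Char.ofNat (65 + j)).toNat = 65 + (j + k) % 26 := by
        rw [htn]; unfold shiftCode
        rw [if_neg (by omega), if_pos (by omega)]
        congr 1; omega
      simp only [pvShiftA, hmem, hlow, hmeml, if_neg, if_pos, Bool.false_eq_true,
        not_false_eq_true, hidx]
      rw [show ((((some j).getD 0 : Nat) : Int) + key) = ((j : Int) + key) by simp,
        hr j hj, (pv_get_alpha ((j + k) % 26) (by omega)).1, hsc]
      exact (pv_get_alpha ((j + k) % 26) (by omega)).2
    · obtain ⟨hm1, hm2⟩ := pv_other_facts c.toNat h hl hu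
      rw [hco] at hm1 hm2
      have hsc : shiftCode k c.toNat = c.toNat := by
        unfold shiftCode; rw [if_neg (by omega), if_neg (by omega)]
      simp only [pvShiftA, hm1, hm2, Bool.false_eq_true, if_neg, not_false_eq_true]
      rw [hsc, hco]

theorem pv_perchar (key : Int) (c : Char) (h : pvDomChar c = true) :
    pvTrans pvScrTbl (pvTrans (pvCaesarTbl (PySem.Int.mod key 26).toNat) c)
      = pvBitA (pvShiftA key c) := by
  have hn : c.toNat < 127 := by simp [pvDomChar] at h; omega
  have hco : Char.ofNat c.toNat = c := Char.ofNat_toNat c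
  have h0 := PySem.Int.mod_nonneg key (show (0:Int) < 26 by norm_num)
  have h1 := PySem.Int.mod_lt key (show (0:Int) < 26 by norm_num)
  have hk26 : (PySem.Int.mod key 26).toNat < 26 := by omega
  rw [pvShiftA_code key c hn, ← hco,
    pv_tbl_eq (PySem.Int.mod key 26).toNat hk26 c.toNat hn,
    pv_scr_eq _ (shiftCode_lt _ _ hn), hco]

theorem pv_maps (key : Int) (l : List Char) (h : ∀ c ∈ l, pvDomChar c = true) :
    (l.map (pvTrans (pvCaesarTbl (PySem.Int.mod key 26).toNat))).map (pvTrans pvScrTbl)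
      = (l.map (pvShiftA key)).map pvBitA := by
  rw [List.map_map, List.map_map]
  apply List.map_congr_left
  intro c hc
  simp only [Function.comp_apply]
  exact pv_perchar key c (h c hc)

-- ===== VERDICT (by name: the statement is the Claim_ definition above) =====
theorem encr_spec : Claim_equal_encr := by
  intro plain_text key_1 hdom
  have hall : ∀ c ∈ plain_text.toList, pvDomChar c = true := by
    simp only [Dom_encr, Bool.and_eq_true, pvDomStr, List.all_eq_true] at hdom
    exact fun c hc => hdom.1 c hc
  unfold Spec_encr encr encr_alt
  exact (congrArg String.mk (pv_maps key_1 plain_text.toList hall)).symm
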